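-- pv_equiv track=rewrite | github.com/TPO-Code/PyTPO | topbar/system_menu/service.py | _split_pactl_sections
-- ===== SOURCE A (Python) =====
-- def _split_pactl_sections(text: str, header_prefix: str) -> list[list[str]]:
--     sections: list[list[str]] = []
--     current: list[str] = []
--     for raw_line in (text or "").splitlines():
--         line = raw_line.rstrip()
--         if line.startswith(header_prefix):
--             if current:
--                 sections.append(current)
--             current = [line]
--             continue
--         if current:
--             current.append(line)
--     if current:
--         sections.append(current)
--     return sections
-- ===== SOURCE B (Python) =====
-- def _split_pactl_sections(text: str, header_prefix: str) -> list[list[str]]: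
--     lines = [l.rstrip() for l in (text or "").splitlines()]
--     idxs = [i for i, l in enumerate(lines) if l.startswith(header_prefix)]
--     return [lines[s:e] for s, e in zip(idxs, idxs[1:] + [len(lines)])]
-- ===== Notes on version B (the rewrite author's own statement) =====
-- stated objective: simpler
-- what changed: Replaced the stateful accumulator loop (current/sections with conditional flushes) by an index-and-slice decomposition: find all header line positions, then emit the slices between consecutive header positions.
import Mathlib
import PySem

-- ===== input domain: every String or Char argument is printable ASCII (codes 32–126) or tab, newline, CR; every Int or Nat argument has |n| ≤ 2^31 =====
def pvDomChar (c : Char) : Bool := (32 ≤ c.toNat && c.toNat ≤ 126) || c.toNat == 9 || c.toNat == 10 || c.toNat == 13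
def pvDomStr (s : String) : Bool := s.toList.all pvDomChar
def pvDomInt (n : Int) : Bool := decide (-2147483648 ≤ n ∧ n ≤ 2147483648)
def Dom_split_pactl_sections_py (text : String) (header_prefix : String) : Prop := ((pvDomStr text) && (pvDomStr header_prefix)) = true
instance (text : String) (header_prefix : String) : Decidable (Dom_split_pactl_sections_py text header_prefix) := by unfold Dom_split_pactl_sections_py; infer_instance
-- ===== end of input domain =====

-- B replaces A's stateful accumulator loop by header-position indexing plus slicing between
-- consecutive header positions (objective: simpler decomposition; same asymptotic cost).

-- ===== PORT A =====
-- loop body of A's `for raw_line in (text or "").splitlines():` (state = (sections, current))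
def pvStepA (header_prefix : String) (st : List (List String) × List String)
    (raw_line : String) : List (List String) × List String :=
  let line := PySem.Str.rstrip raw_line
  if PySem.Str.startswith line header_prefix then
    (if st.2 ≠ [] then st.1 ++ [st.2] else st.1, [line])
  else
    if st.2 ≠ [] then (st.1, st.2 ++ [line]) else st

def split_pactl_sections_py (text : String) (header_prefix : String) : List (List String) :=
  let r := (PySem.Str.splitlines (if text = "" then "" else text)).foldl
            (pvStepA header_prefix) ([], [])
  if r.2 ≠ [] then r.1 ++ [r.2] else r.1

-- ===== PORT B =====
def split_pactl_sections_py_alt (text : String) (header_prefix : String) : List (List String) :=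
  let lines := (PySem.Str.splitlines (if text = "" then "" else text)).map PySem.Str.rstrip
  let idxs := (PySem.List.enumerate lines).filterMap
    (fun q => if PySem.Str.startswith q.2 header_prefix then some q.1 else none)
  (List.zip idxs (PySem.List.slice idxs (some 1) none ++ [(lines.length : Int)])).map
    (fun q => PySem.List.slice lines (some q.1) (some q.2))

-- ===== PRECONDITION & SPEC =====
def Spec_split_pactl_sections_py (text : String) (header_prefix : String) (out : List (List String)) : Prop := out = split_pactl_sections_py_alt text header_prefix
instance (text : String) (header_prefix : String) (out : List (List String)) : Decidable (Spec_split_pactl_sections_py text header_prefix out) := by unfold Spec_split_pactl_sections_py; infer_instance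

-- ===== CLAIM (what is proved, stated in full; the proofs are below) =====
def Claim_equal_split_pactl_sections_py : Prop := ∀ (text : String) (header_prefix : String), Dom_split_pactl_sections_py text header_prefix → Spec_split_pactl_sections_py text header_prefix (split_pactl_sections_py text header_prefix)

-- ===== LEMMAS AND PROOFS =====

-- canonical form both ports are reduced to: the maximal blocks each starting at a p-line,
-- lines before the first p-line dropped
def pvChunks {α : Type} (p : α → Bool) : List α → List (List α)
  | [] => []
  | l :: ls =>
    if p l then
      (l :: ls.takeWhile (fun x => !p x)) :: pvChunks p (ls.dropWhile (fun x => !p x))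
    else pvChunks p ls
termination_by ls => ls.length
decreasing_by
  · have := List.length_dropWhile_le (fun x => !p x) ls; simp; omega
  · simp

-- A's loop step on an already-rstripped line
def pvStep {α : Type} (p : α → Bool) (st : List (List α) × List α) (l : α) :
    List (List α) × List α :=
  if p l then (if st.2 ≠ [] then st.1 ++ [st.2] else st.1, [l])
  else if st.2 ≠ [] then (st.1, st.2 ++ [l]) else st

def pvFin {α : Type} (r : List (List α) × List α) : List (List α) :=
  if r.2 ≠ [] then r.1 ++ [r.2] else r.1

theorem pvFoldA {α : Type} (p : α → Bool) :
    ∀ (ls : List α) (secs : List (List α)) (cur : List α),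
      pvFin (ls.foldl (pvStep p) (secs, cur)) =
        secs ++ (if cur = [] then pvChunks p ls
                 else (cur ++ ls.takeWhile (fun x => !p x)) ::
                        pvChunks p (ls.dropWhile (fun x => !p x))) := by
  intro ls
  induction ls with
  | nil =>
    intro secs cur
    by_cases h : cur = [] <;> simp [pvFin, pvChunks, h]
  | cons l ls ih =>
    intro secs cur
    by_cases hp : p l
    · by_cases h : cur = []
      · simp [List.foldl_cons, pvStep, hp, h, ih, pvChunks]
      · simp [List.foldl_cons, pvStep, hp, h, ih, pvChunks]
    · by_cases h : cur = []
      · simp [List.foldl_cons, pvStep, hp, h, ih, pvChunks]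
      · simp [List.foldl_cons, pvStep, hp, h, ih]

-- B-side: header positions, starting from offset s
def pvIdx {α : Type} (p : α → Bool) (s : Int) (ls : List α) : List Int :=
  (PySem.List.enumerate ls s).filterMap (fun q => if p q.2 then some q.1 else none)

theorem pvIdx_cons {α : Type} (p : α → Bool) (s : Int) (l : α) (ls : List α) :
    pvIdx p s (l :: ls) = (if p l then [s] else []) ++ pvIdx p (s + 1) ls := by
  by_cases hp : p l <;> simp [pvIdx, PySem.List.enumerate_cons, hp]

theorem pvIdx_shift {α : Type} (p : α → Bool) :
    ∀ (ls : List α) (s : Int), pvIdx p (s + 1) ls = (pvIdx p s ls).map (· + 1) := by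
  intro ls
  induction ls with
  | nil => intro s; simp [pvIdx]
  | cons l ls ih =>
    intro s
    rw [pvIdx_cons, pvIdx_cons, ih (s + 1)]
    by_cases hp : p l <;> simp [hp]

theorem pvIdx_nonneg {α : Type} (p : α → Bool) :
    ∀ (ls : List α) (s : Int) (x : Int), x ∈ pvIdx p s ls → s ≤ x := by
  intro ls
  induction ls with
  | nil => intro s x hx; simp [pvIdx] at hx
  | cons l ls ih =>
    intro s x hx
    rw [pvIdx_cons] at hx
    rcases List.mem_append.1 hx with h | h
    · by_cases hp : p l <;> simp [hp] at h; omega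
    · have := ih (s + 1) x h; omega

theorem pvIdx_nil_takeWhile {α : Type} (p : α → Bool) :
    ∀ (ls : List α) (s : Int), pvIdx p s ls = [] → ls.takeWhile (fun x => !p x) = ls := by
  intro ls
  induction ls with
  | nil => intro s _; simp
  | cons l ls ih =>
    intro s h
    rw [pvIdx_cons] at h
    rcases List.append_eq_nil_iff.1 h with ⟨h1, h2⟩
    by_cases hp : p l
    · simp [hp] at h1
    · simp [hp, ih (s + 1) h2]

theorem pvIdx_head_takeWhile {α : Type} (p : α → Bool) :
    ∀ (ls : List α) (i : Int) (t : List Int), pvIdx p 0 ls = i :: t →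
      ls.take i.toNat = ls.takeWhile (fun x => !p x) := by
  intro ls
  induction ls with
  | nil => intro i t h; simp [pvIdx] at h
  | cons l ls ih =>
    intro i t h
    rw [pvIdx_cons] at h
    by_cases hp : p l
    · rw [if_pos hp, List.singleton_append] at h
      have hi : i = 0 := (List.cons_eq_cons.1 h).1.symm
      simp [hi, hp]
    · rw [if_neg hp, List.nil_append, pvIdx_shift p ls 0] at h
      obtain ⟨i', t', hJ, hi, ht⟩ := List.map_eq_cons_iff.mp h
      have hnn : 0 ≤ i' := pvIdx_nonneg p ls 0 i' (by rw [hJ]; exact List.mem_cons_self ..)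
      have htn : i.toNat = i'.toNat + 1 := by omega
      rw [htn, List.take_succ_cons, List.takeWhile_cons]
      simp only [hp, Bool.not_false, if_true]
      rw [ih i' t' hJ]

theorem pvSliceShift {α : Type} (ls : List α) (l : α) (a b : Int) (ha : 0 ≤ a) (hb : 0 ≤ b) :
    PySem.List.slice (l :: ls) (some (a + 1)) (some (b + 1)) =
      PySem.List.slice ls (some a) (some b) := by
  rw [PySem.List.slice_toNat _ (by omega) (by omega), PySem.List.slice_toNat _ ha hb]
  have h2 : (b + 1).toNat - (a + 1).toNat = b.toNat - a.toNat := by omega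
  have h1 : (a + 1).toNat = a.toNat + 1 := by omega
  rw [h2, h1, List.drop_succ_cons]

theorem pvChunks_dropWhile {α : Type} (p : α → Bool) :
    ∀ (ls : List α), pvChunks p (ls.dropWhile (fun x => !p x)) = pvChunks p ls := by
  intro ls
  induction ls with
  | nil => simp
  | cons l ls ih =>
    by_cases hp : p l
    · simp [hp]
    · rw [List.dropWhile_cons]
      simp only [hp, Bool.not_false, if_true]
      rw [ih, pvChunks]
      simp [hp]

-- the slice form over a zip of shifted indices, on the extended list
theorem pvZipShift {α : Type} (l : α) (ls : List α) (J K : List Int)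
    (hJ : ∀ x ∈ J, 0 ≤ x) (hK : ∀ x ∈ K, 0 ≤ x) :
    (List.zip (J.map (· + 1)) (K.map (· + 1))).map
        (fun q => PySem.List.slice (l :: ls) (some q.1) (some q.2)) =
      (List.zip J K).map (fun q => PySem.List.slice ls (some q.1) (some q.2)) := by
  rw [List.zip_map, List.map_map]
  apply List.map_congr_left
  intro q hq
  have hmem := List.of_mem_zip hq
  exact pvSliceShift ls l q.1 q.2 (hJ q.1 hmem.1) (hK q.2 hmem.2)

theorem pvSlices {α : Type} (p : α → Bool) :
    ∀ (ls : List α),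
      (List.zip (pvIdx p 0 ls) ((pvIdx p 0 ls).drop 1 ++ [(ls.length : Int)])).map
          (fun q => PySem.List.slice ls (some q.1) (some q.2)) = pvChunks p ls := by
  intro ls
  induction ls with
  | nil => simp [pvIdx, pvChunks]
  | cons l ls ih =>
    have hlen : (((l :: ls).length : Nat) : Int) = (ls.length : Int) + 1 := by
      push_cast [List.length_cons]; ring
    have hnn : ∀ x ∈ pvIdx p 0 ls, 0 ≤ x := fun x hx => pvIdx_nonneg p ls 0 x hx
    rw [pvIdx_cons, pvIdx_shift p ls 0]
    by_cases hp : p l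
    · rw [if_pos hp, List.singleton_append]
      rcases hJ : pvIdx p 0 ls with _ | ⟨i, t⟩
      · -- no header in the tail: the single slice is the whole list
        simp only [List.map_nil, List.drop_succ_cons, List.drop_nil, List.nil_append,
          List.zip_cons_cons, List.zip_nil_right, List.map_cons, List.map_nil]
        rw [hlen]
        rw [PySem.List.slice_toNat _ (by norm_num) (by positivity)]
        have h1 : ((ls.length : Int) + 1).toNat = ls.length + 1 := by omega
        rw [h1]
        simp only [Int.toNat_zero, List.drop_zero]
        rw [List.take_of_length_le (by simp)]
        have htw : ls.takeWhile (fun x => !p x) = ls := pvIdx_nil_takeWhile p ls 0 hJ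
        have hdw : ls.dropWhile (fun x => !p x) = [] := by
          rw [List.dropWhile_eq_nil_iff]
          intro x hx
          exact List.mem_takeWhile_imp (p := fun x => !p x)
            (show x ∈ ls.takeWhile (fun x => !p x) by rw [htw]; exact hx)
        rw [pvChunks]
        simp [hp, htw, hdw, pvChunks]
      · have hi : 0 ≤ i := hnn i (by rw [hJ]; exact List.mem_cons_self ..)
        rw [List.drop_succ_cons, List.drop_zero, List.map_cons, List.cons_append,
          List.zip_cons_cons, List.map_cons, hlen]
        -- fold the tail back into mapped form and shift it down to `ls`
        rw [show ((t.map (· + 1)) ++ [(ls.length : Int) + 1] =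
              ((t ++ [(ls.length : Int)]).map (· + 1))) by simp]
        rw [show ((i + 1) :: t.map (· + 1) = (i :: t).map (· + 1)) by simp]
        rw [pvZipShift l ls (i :: t) (t ++ [(ls.length : Int)])
              (by intro x hx; apply hnn; rw [hJ]; exact hx)
              (by intro x hx
                  rcases List.mem_append.1 hx with hx | hx
                  · apply hnn; rw [hJ]; exact List.mem_cons_of_mem _ hx
                  · simp at hx; omega)]
        have ih' : (List.zip (i :: t) (t ++ [(ls.length : Int)])).map
            (fun q => PySem.List.slice ls (some q.1) (some q.2)) = pvChunks p ls := by
          rw [hJ] at ih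
          simpa using ih
        rw [ih']
        -- head slice: lines before the next header, led by l
        have hhead : PySem.List.slice (l :: ls) (some 0) (some (i + 1)) =
            l :: ls.take i.toNat := by
          rw [PySem.List.slice_toNat _ (by norm_num) (by omega)]
          have h1 : (i + 1).toNat = i.toNat + 1 := by omega
          simp [h1]
        rw [hhead, pvIdx_head_takeWhile p ls i t hJ, pvChunks]
        simp [hp, pvChunks_dropWhile]
    · rw [if_neg hp, List.nil_append]
      rw [← List.map_drop, hlen]
      rw [show (((pvIdx p 0 ls).drop 1).map (· + 1) ++ [(ls.length : Int) + 1] =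
            (((pvIdx p 0 ls).drop 1) ++ [(ls.length : Int)]).map (· + 1)) by simp]
      rw [pvZipShift l ls _ _
            (by intro x hx; exact hnn x hx)
            (by intro x hx
                rcases List.mem_append.1 hx with hx | hx
                · exact hnn x (List.mem_of_mem_drop hx)
                · simp at hx; omega)]
      rw [ih, pvChunks]
      simp [hp]

-- A in canonical form
theorem pvA_eq (text header_prefix : String) :
    split_pactl_sections_py text header_prefix =
      pvChunks (fun l => PySem.Str.startswith l header_prefix)
        ((PySem.Str.splitlines (if text = "" then "" else text)).map PySem.Str.rstrip) := by
  have h : split_pactl_sections_py text header_prefix =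
      pvFin (((PySem.Str.splitlines (if text = "" then "" else text)).map PySem.Str.rstrip).foldl
        (pvStep (fun l => PySem.Str.startswith l header_prefix)) ([], [])) := by
    rw [List.foldl_map]
    rfl
  rw [h, pvFoldA]
  simp

-- B in canonical form
theorem pvB_eq (text header_prefix : String) :
    split_pactl_sections_py_alt text header_prefix =
      pvChunks (fun l => PySem.Str.startswith l header_prefix)
        ((PySem.Str.splitlines (if text = "" then "" else text)).map PySem.Str.rstrip) := by
  show (List.zip
      (pvIdx (fun l => PySem.Str.startswith l header_prefix) 0
        ((PySem.Str.splitlines (if text = "" then "" else text)).map PySem.Str.rstrip))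
      (PySem.List.slice
        (pvIdx (fun l => PySem.Str.startswith l header_prefix) 0
          ((PySem.Str.splitlines (if text = "" then "" else text)).map PySem.Str.rstrip))
        (some 1) none ++
        [((((PySem.Str.splitlines (if text = "" then "" else text)).map PySem.Str.rstrip).length : Nat) : Int)])).map
      (fun q =>
        PySem.List.slice
          ((PySem.Str.splitlines (if text = "" then "" else text)).map PySem.Str.rstrip)
          (some q.1) (some q.2)) =
    pvChunks (fun l => PySem.Str.startswith l header_prefix)
      ((PySem.Str.splitlines (if text = "" then "" else text)).map PySem.Str.rstrip)
  rw [PySem.List.slice_from_one, ← List.drop_one]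
  exact pvSlices (fun l => PySem.Str.startswith l header_prefix) _

-- ===== VERDICT (by name: the statement is the Claim_ definition above) =====
theorem split_pactl_sections_py_spec : Claim_equal_split_pactl_sections_py := by
  intro text header_prefix _
  unfold Spec_split_pactl_sections_py
  rw [pvA_eq, pvB_eq]
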